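-- pv_equiv track=rewrite | github.com/ByeonSeungHa/Python | programmers/비밀지도.py | solution
-- ===== SOURCE A (Python) =====
-- def solution(n, arr1, arr2):
--     answer = []
--     for i in range(len(arr1)):
--         a  = str(bin(arr1[i])[2:])
--         while  len(a) != n:
--             a = '0' + a
--         b = str(bin(arr2[i])[2:])
--         while len(b) != n:
--             b = '0' + b
--         list_a = list(map(int,list(a)))
--         list_b = list(map(int,list(b)))
--         list_c = []
--         for i in range(len(list_a)):
--             if list_a[i]+list_b[i] == 0:
--                 list_c.append(' ')
--             else :
--                 list_c.append('#')
--         answer.append(''.join(list_c))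
--
--
--     return answer
--
-- n = 5
--
-- arr1 = [9, 20, 28, 18, 11]
--
-- arr2 = [30, 1, 21, 17, 28]
-- ===== SOURCE B (Python) =====
-- def solution(n, arr1, arr2):
--     answer = []
--     for a, b in zip(arr1, arr2):
--         c = a | b
--         answer.append(''.join('#' if (c >> k) & 1 else ' ' for k in range(n - 1, -1, -1)))
--     return answer
-- ===== Notes on version B (the rewrite author's own statement) =====
-- stated objective: faster
-- what changed: B replaces A's per-row string padding while-loops, int-list construction and index-by-index sum comparison with one integer bitwise OR per pair followed by direct bit extraction (MSB first); intended as faster (A's repeated '0'+a prepending is quadratic in n per row) and a timing run measured B 5.36x at the largest size both finished, though it could not confirm the label because A timed out on larger inputs where B's answer could not be cross-checked.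
import Mathlib
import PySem

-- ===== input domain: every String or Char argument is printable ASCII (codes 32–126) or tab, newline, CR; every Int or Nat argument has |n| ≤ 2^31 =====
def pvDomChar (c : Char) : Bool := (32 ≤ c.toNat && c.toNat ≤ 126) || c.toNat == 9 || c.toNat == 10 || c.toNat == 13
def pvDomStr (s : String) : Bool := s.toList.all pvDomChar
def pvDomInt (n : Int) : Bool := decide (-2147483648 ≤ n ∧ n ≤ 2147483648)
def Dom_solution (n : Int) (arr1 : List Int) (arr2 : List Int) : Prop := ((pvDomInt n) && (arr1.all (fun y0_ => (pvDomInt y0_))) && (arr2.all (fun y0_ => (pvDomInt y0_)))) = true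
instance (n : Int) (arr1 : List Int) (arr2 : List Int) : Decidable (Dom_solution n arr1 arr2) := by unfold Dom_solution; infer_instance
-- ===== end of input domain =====

-- B renders each row from the integer bitwise OR of the pair by direct bit extraction,
-- instead of A's string padding loops + int-list construction + per-index comparison (objective: faster).

-- ===== PORT A =====
-- Python's bin(x)[2:] for the nonnegative x admitted by Pre_ (exact there): binary digits, MSB first.
def binChars (x : Nat) : List Char :=
  if h : x < 2 then [Char.ofNat (48 + x)]
  else binChars (x / 2) ++ [Char.ofNat (48 + x % 2)]
decreasing_by exact Nat.div_lt_self (by omega) (by omega)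

-- the `while len(a) != n: a = '0' + a` loop; fuel makes it total (enough fuel under Pre_).
def padWhile (fuel : Nat) (n : Int) (a : List Char) : List Char :=
  match fuel with
  | 0 => a
  | f + 1 => if (a.length : Int) = n then a else padWhile f n ('0' :: a)

def solution (n : Int) (arr1 : List Int) (arr2 : List Int) : List String :=
  (List.range arr1.length).foldl (fun answer i =>
    let a := padWhile (n.toNat + 1) n (binChars (arr1.getD i 0).toNat)
    let b := padWhile (n.toNat + 1) n (binChars (arr2.getD i 0).toNat)
    -- list(map(int, list(a))): int(c) is exact as c.toNat - 48 on the digit chars present under Pre_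
    let la := a.map (fun c => (c.toNat : Int) - 48)
    let lb := b.map (fun c => (c.toNat : Int) - 48)
    let lc := (List.range la.length).foldl (fun acc j =>
      if la.getD j 0 + lb.getD j 0 = 0 then acc ++ [' '] else acc ++ ['#']) ([] : List Char)
    answer ++ [String.mk lc]) []

-- ===== PORT B =====
def solution_alt (n : Int) (arr1 : List Int) (arr2 : List Int) : List String :=
  (arr1.zip arr2).map (fun p =>
    -- a | b, c >> k, & 1: Int.lor / Int.shiftRight / Int.land are exact for Python's
    -- two's-complement |, arithmetic >>, & on every int (the shift count k is ≥ 0 here)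
    let c : Int := Int.lor p.1 p.2
    -- range(n-1, -1, -1) = [n-1, …, 0] for every n (empty when n ≤ 0)
    String.mk (((List.range n.toNat).reverse).map (fun k =>
      if Int.land (Int.shiftRight c k) 1 ≠ 0 then '#' else ' ')))

-- ===== PRECONDITION & SPEC =====
-- Pre_ admits exactly the inputs on which A returns: arr2 at least as long as arr1 (else IndexError),
-- n ≥ 1, and each used value nonnegative (negative values make int() raise ValueError on the 'b' of
-- '-0b…'[2:]) and < 2^n, i.e. its binary form has at most n digits (stated via Nat.log2; for larger
-- values the padding while-loop `while len(a) != n` never terminates).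
def Pre_solution (n : Int) (arr1 : List Int) (arr2 : List Int) : Prop :=
  arr1.length ≤ arr2.length ∧
  ∀ i ∈ List.range arr1.length, 1 ≤ n ∧
    0 ≤ arr1.getD i 0 ∧ (arr1.getD i 0 = 0 ∨ ((arr1.getD i 0).toNat.log2 : Int) < n) ∧
    0 ≤ arr2.getD i 0 ∧ (arr2.getD i 0 = 0 ∨ ((arr2.getD i 0).toNat.log2 : Int) < n)
instance (n : Int) (arr1 : List Int) (arr2 : List Int) : Decidable (Pre_solution n arr1 arr2) := by
  unfold Pre_solution; infer_instance

def pvWitness_solution : Int × List Int × List Int := (5, [9, 20, 28, 18, 11], [30, 1, 21, 17, 28])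

def Spec_solution (n : Int) (arr1 : List Int) (arr2 : List Int) (out : List String) : Prop := out = solution_alt n arr1 arr2
instance (n : Int) (arr1 : List Int) (arr2 : List Int) (out : List String) : Decidable (Spec_solution n arr1 arr2 out) := by unfold Spec_solution; infer_instance

-- ===== CLAIM (what is proved, stated in full; the proofs are below) =====
def Claim_equal_solution : Prop := ∀ (n : Int) (arr1 : List Int) (arr2 : List Int), Dom_solution n arr1 arr2 → Pre_solution n arr1 arr2 → Spec_solution n arr1 arr2 (solution n arr1 arr2)

-- ===== LEMMAS AND PROOFS =====

-- the MSB-first n-bit rendering both rows reduce to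
def bits (m : Nat) (x : Nat) : List Char :=
  (List.range m).map (fun j => if x.testBit (m - 1 - j) then '1' else '0')

theorem foldl_snoc {α β : Type} (l : List α) (f : α → β) (init : List β) :
    l.foldl (fun acc x => acc ++ [f x]) init = init ++ l.map f := by
  induction l generalizing init with
  | nil => simp
  | cons a t ih => simp [List.foldl_cons, ih]

theorem padWhile_eq (f : Nat) (n : Int) (s : List Char)
    (h0 : 0 ≤ n) (hlen : s.length ≤ n.toNat) (hf : n.toNat < f + s.length) :
    padWhile f n s = List.replicate (n.toNat - s.length) '0' ++ s := by
  induction f generalizing s with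
  | zero => omega
  | succ f ih =>
    simp only [padWhile]
    by_cases h : (s.length : Int) = n
    · have hsl : s.length = n.toNat := by omega
      rw [if_pos h, hsl, Nat.sub_self, List.replicate_zero, List.nil_append]
    · have hne : s.length ≠ n.toNat := by omega
      rw [if_neg h, ih ('0' :: s) (by simp; omega) (by simp; omega)]
      have : n.toNat - s.length = (n.toNat - (s.length + 1)) + 1 := by omega
      rw [this, List.replicate_succ']
      simp

theorem bits_zero (m : Nat) : bits m 0 = List.replicate m '0' := by
  simp [bits, List.map_eq_replicate_iff]

theorem bits_succ (m x : Nat) :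
    bits (m + 1) x = bits m (x / 2) ++ [if x % 2 = 1 then '1' else '0'] := by
  simp only [bits, List.range_succ, List.map_append, List.map_cons, List.map_nil]
  congr 1
  · apply List.map_congr_left
    intro j hj
    have hj' : j < m := List.mem_range.mp hj
    have : m + 1 - 1 - j = (m - 1 - j) + 1 := by omega
    rw [this, Nat.testBit_add_one]
  · have : m + 1 - 1 - m = 0 := by omega
    rw [this, Nat.testBit_zero]
    rcases Nat.mod_two_eq_zero_or_one x with h | h <;> simp [h]

theorem binChars_eq_bits (x : Nat) : ∀ n', 1 ≤ n' → x < 2 ^ n' →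
    List.replicate (n' - (binChars x).length) '0' ++ binChars x = bits n' x := by
  induction x using Nat.strong_induction_on with
  | _ x ih =>
    intro n' h1 hx
    by_cases h : x < 2
    · rw [binChars, dif_pos h]
      obtain ⟨m, rfl⟩ : ∃ m, n' = m + 1 := ⟨n' - 1, by omega⟩
      rw [bits_succ]
      have hx2 : x / 2 = 0 := by omega
      rw [hx2, bits_zero]
      have : m + 1 - 1 = m := by omega
      rw [List.length_cons, List.length_nil, this]
      interval_cases x <;> rfl
    · rw [binChars, dif_neg h]
      have hn2 : 2 ≤ n' := by
        by_contra hc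
        have : n' = 1 := by omega
        rw [this] at hx; omega
      obtain ⟨m, rfl⟩ : ∃ m, n' = m + 1 := ⟨n' - 1, by omega⟩
      rw [bits_succ]
      have hdiv : x / 2 < 2 ^ m := by
        rw [Nat.div_lt_iff_lt_mul (by norm_num)]
        calc x < 2 ^ (m + 1) := hx
        _ = 2 ^ m * 2 := by ring
      have ihx := ih (x / 2) (Nat.div_lt_self (by omega) (by omega)) m (by omega) hdiv
      have hlast : Char.ofNat (48 + x % 2) = if x % 2 = 1 then '1' else '0' := by
        rcases Nat.mod_two_eq_zero_or_one x with h2 | h2 <;> simp [h2] <;> rfl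
      rw [List.length_append, List.length_cons, List.length_nil]
      have : m + 1 - ((binChars (x / 2)).length + 1) = m - (binChars (x / 2)).length := by omega
      rw [this, ← List.append_assoc, ihx, hlast]

theorem binChars_len_le (x n' : Nat) (h1 : 1 ≤ n') (hx : x < 2 ^ n') :
    (binChars x).length ≤ n' := by
  have := congrArg List.length (binChars_eq_bits x n' h1 hx)
  simp [bits] at this
  omega

theorem and_one_ne (c k : Nat) : ((c >>> k) &&& 1 ≠ 0) ↔ c.testBit k := by
  rw [Nat.testBit, Nat.and_one_is_mod]
  have := Nat.mod_lt (c >>> k) (y := 2) (by norm_num)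
  constructor
  · intro h; simp [Nat.and_one_is_mod]; omega
  · intro h; simp [Nat.and_one_is_mod] at h; omega

-- proof-only abbreviations for the two row computations
def innerA (n : Int) (a b : Int) : List Char :=
  let pa := padWhile (n.toNat + 1) n (binChars a.toNat)
  let pb := padWhile (n.toNat + 1) n (binChars b.toNat)
  let la := pa.map (fun c => (c.toNat : Int) - 48)
  let lb := pb.map (fun c => (c.toNat : Int) - 48)
  (List.range la.length).foldl (fun acc j =>
    if la.getD j 0 + lb.getD j 0 = 0 then acc ++ [' '] else acc ++ ['#']) []

def innerB (n : Int) (a b : Int) : List Char :=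
  ((List.range n.toNat).reverse).map (fun k =>
    if Int.land (Int.shiftRight (Int.lor a b) k) 1 ≠ 0 then '#' else ' ')

theorem int_bit_eq (a b : Int) (k : Nat) (ha : 0 ≤ a) (hb : 0 ≤ b) :
    (Int.land (Int.shiftRight (Int.lor a b) k) 1 ≠ 0) ↔
      ((a.toNat ||| b.toNat) >>> k &&& 1 ≠ 0) := by
  obtain ⟨m, rfl⟩ := Int.eq_ofNat_of_zero_le ha
  obtain ⟨m', rfl⟩ := Int.eq_ofNat_of_zero_le hb
  have h1 : Int.land (Int.shiftRight (Int.lor (m : Int) (m' : Int)) k) 1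
      = (((m ||| m') >>> k &&& 1 : Nat) : Int) := rfl
  rw [h1]
  exact Int.natCast_ne_zero

theorem innerB_nat (n : Int) (a b : Int) (ha : 0 ≤ a) (hb : 0 ≤ b) :
    innerB n a b = ((List.range n.toNat).reverse).map (fun k =>
      if (a.toNat ||| b.toNat) >>> k &&& 1 ≠ 0 then '#' else ' ') := by
  unfold innerB
  apply List.map_congr_left
  intro k _
  by_cases h : (a.toNat ||| b.toNat) >>> k &&& 1 ≠ 0
  · rw [if_pos ((int_bit_eq a b k ha hb).mpr h), if_pos h]
  · rw [if_neg (fun hp => h ((int_bit_eq a b k ha hb).mp hp)), if_neg h]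

theorem foldl_snoc_nil {α β : Type} (l : List α) (f : α → β) :
    l.foldl (fun acc x => acc ++ [f x]) [] = l.map f := by
  rw [foldl_snoc, List.nil_append]

-- the single-row equality
theorem row_eq (n : Int) (a b : Int) (h1 : 1 ≤ n) (ha0 : 0 ≤ a) (hb0 : 0 ≤ b)
    (ha : a.toNat < 2 ^ n.toNat) (hb : b.toNat < 2 ^ n.toNat) :
    innerA n a b = innerB n a b := by
  rw [innerB_nat n a b ha0 hb0]
  have hn1 : 1 ≤ n.toNat := by omega
  have hpada : padWhile (n.toNat + 1) n (binChars a.toNat) = bits n.toNat a.toNat := by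
    rw [padWhile_eq _ _ _ (by omega) (binChars_len_le _ _ hn1 ha) (by omega),
      binChars_eq_bits _ _ hn1 ha]
  have hpadb : padWhile (n.toNat + 1) n (binChars b.toNat) = bits n.toNat b.toNat := by
    rw [padWhile_eq _ _ _ (by omega) (binChars_len_le _ _ hn1 hb) (by omega),
      binChars_eq_bits _ _ hn1 hb]
  unfold innerA
  simp only [hpada, hpadb]
  set f : Char → Int := fun c => (c.toNat : Int) - 48 with hf
  set la := (bits n.toNat a.toNat).map f with hla
  set lb := (bits n.toNat b.toNat).map f with hlb
  have hbody : (fun (acc : List Char) (j : Nat) =>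
      if la.getD j 0 + lb.getD j 0 = 0 then acc ++ [' '] else acc ++ ['#'])
      = fun acc j => acc ++ [if la.getD j 0 + lb.getD j 0 = 0 then ' ' else '#'] := by
    funext acc j; split <;> rfl
  rw [hbody, foldl_snoc_nil]
  have hlalen : la.length = n.toNat := by simp [hla, bits]
  have hlblen : lb.length = n.toNat := by simp [hlb, bits]
  apply List.ext_getElem
  · simp [hlalen]
  · intro i hi1 hi2
    simp only [List.getElem_map, List.getElem_range, List.getElem_reverse,
      List.length_reverse, List.length_range] at *
    have him : i < n.toNat := by simpa [hlalen] using hi1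
    have hgla : la.getD i 0 = if a.toNat.testBit (n.toNat - 1 - i) then (1 : Int) else 0 := by
      rw [List.getD_eq_getElem la 0 (by omega)]
      simp [hla, hf, bits]
      split <;> rfl
    have hglb : lb.getD i 0 = if b.toNat.testBit (n.toNat - 1 - i) then (1 : Int) else 0 := by
      rw [List.getD_eq_getElem lb 0 (by omega)]
      simp [hlb, hf, bits]
      split <;> rfl
    rw [hgla, hglb]
    by_cases hc : (a.toNat ||| b.toNat).testBit (n.toNat - 1 - i)
    · rw [if_pos ((and_one_ne _ _).mpr hc)]
      rw [Nat.testBit_lor] at hc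
      cases hA : a.toNat.testBit (n.toNat - 1 - i) <;>
        cases hB : b.toNat.testBit (n.toNat - 1 - i) <;>
          simp [hA, hB] at hc ⊢
    · rw [if_neg (fun hp => hc ((and_one_ne _ _).mp hp))]
      rw [Nat.testBit_lor] at hc
      cases hA : a.toNat.testBit (n.toNat - 1 - i) <;>
        cases hB : b.toNat.testBit (n.toNat - 1 - i) <;>
          simp [hA, hB] at hc ⊢

-- ===== VERDICT (by name: the statement is the Claim_ definition above) =====
theorem solution_spec : Claim_equal_solution := by
  unfold Claim_equal_solution
  intro n arr1 arr2 _hdom hpre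
  unfold Spec_solution
  obtain ⟨hlen, hvals⟩ := hpre
  have e1 : solution n arr1 arr2
      = (List.range arr1.length).map
          (fun i => String.mk (innerA n (arr1.getD i 0) (arr2.getD i 0))) := by
    rw [← foldl_snoc_nil]; rfl
  have e2 : solution_alt n arr1 arr2
      = (arr1.zip arr2).map (fun p => String.mk (innerB n p.1 p.2)) := rfl
  rw [e1, e2]
  apply List.ext_getElem
  · simp [List.length_zip]; omega
  · intro i hi1 hi2
    have him : i < arr1.length := by simpa using hi1
    have him2 : i < arr2.length := by omega
    obtain ⟨hn1, ha0, ha, hb0, hb⟩ := hvals i (List.mem_range.mpr him)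
    simp only [List.getElem_map, List.getElem_range, List.getElem_zip]
    have bound : ∀ x : Int, 0 ≤ x → (x = 0 ∨ ((x.toNat.log2 : Int) < n)) →
        x.toNat < 2 ^ n.toNat := by
      intro x hx0 hx
      rcases hx with rfl | hlog
      · simpa using Nat.two_pow_pos n.toNat
      · by_cases hz : x.toNat = 0
        · rw [hz]; exact Nat.two_pow_pos _
        · exact (Nat.log2_lt hz).mp (by omega)
    have hga : arr1.getD i 0 = arr1[i] := List.getD_eq_getElem arr1 0 him
    have hgb : arr2.getD i 0 = arr2[i] := List.getD_eq_getElem arr2 0 him2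
    rw [hga] at ha0 ha
    rw [hgb] at hb0 hb
    congr 1
    rw [hga, hgb]
    exact row_eq n arr1[i] arr2[i] hn1 ha0 hb0 (bound _ ha0 ha) (bound _ hb0 hb)
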